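-- pv_equiv track=rewrite | github.com/Adam-Jimenez/binarysearch-editorials | Number of Sublists With Sum of Target.py | solve
-- ===== SOURCE A (Python) =====
-- from collections import defaultdict
--
-- def solve(nums, target):
--     seen=defaultdict(int)
--     seen[0]=1
--     s=0
--     ans=0
--     for i in range(len(nums)):
--         s+=nums[i]
--         comp=s-target
--         if comp in seen:
--             ans+=seen[comp]
--         seen[s]+=1
--     return ans
-- ===== SOURCE B (Python) =====
-- def solve(nums, target):
--     # Naive re-scan: for each start index, re-accumulate the sublist sum.
--     ans = 0
--     n = len(nums)
--     for i in range(n):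
--         s = 0
--         for j in range(i, n):
--             s += nums[j]
--             if s == target:
--                 ans += 1
--     return ans
-- ===== Notes on version B (the rewrite author's own statement) =====
-- stated objective: alternative
-- what changed: Replaced the one-pass prefix-sum/hash-map complement count with a naive double loop that re-accumulates each sublist sum from every start index, keeping no dictionary at all.
import Mathlib
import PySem

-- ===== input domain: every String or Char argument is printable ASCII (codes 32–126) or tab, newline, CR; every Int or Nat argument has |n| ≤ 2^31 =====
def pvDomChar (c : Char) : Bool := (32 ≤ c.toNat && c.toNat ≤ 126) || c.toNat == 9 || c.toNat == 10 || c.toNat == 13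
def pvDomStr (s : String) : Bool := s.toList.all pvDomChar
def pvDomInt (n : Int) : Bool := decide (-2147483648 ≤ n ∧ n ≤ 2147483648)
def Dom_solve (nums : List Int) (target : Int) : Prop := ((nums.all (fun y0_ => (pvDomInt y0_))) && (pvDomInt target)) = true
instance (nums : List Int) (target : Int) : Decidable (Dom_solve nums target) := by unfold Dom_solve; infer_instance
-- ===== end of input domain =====

-- B replaces A's one-pass prefix-sum/hash-map complement count by a naive double loop
-- that re-accumulates each sublist sum from every start index (alternative, not faster).

-- ===== PORT A =====
def solve (nums : List Int) (target : Int) : Int :=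
  let seen : PySem.Dict Int Int := PySem.Dict.empty.insert 0 1
  (List.foldl
    (fun (st : PySem.Dict Int Int × Int × Int) i =>
      let s := st.2.1 + PySem.List.pyGetD nums i 0
      let comp := s - target
      let ans := if st.1.contains comp then st.2.2 + st.1.getD comp 0 else st.2.2
      (st.1.modify s 0 (· + 1), s, ans))
    (seen, 0, 0) (PySem.List.pyRange 0 (PySem.List.len nums) 1)).2.2

-- ===== PORT B =====
def solve_alt (nums : List Int) (target : Int) : Int :=
  List.foldl
    (fun ans i =>
      (List.foldl
        (fun (st : Int × Int) j =>
          let s := st.1 + PySem.List.pyGetD nums j 0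
          (s, if s = target then st.2 + 1 else st.2))
        (0, ans) (PySem.List.pyRange i (PySem.List.len nums) 1)).2)
    0 (PySem.List.pyRange 0 (PySem.List.len nums) 1)

-- ===== PRECONDITION & SPEC =====
def Spec_solve (nums : List Int) (target : Int) (out : Int) : Prop := out = solve_alt nums target
instance (nums : List Int) (target : Int) (out : Int) : Decidable (Spec_solve nums target out) := by unfold Spec_solve; infer_instance

-- ===== CLAIM (what is proved, stated in full; the proofs are below) =====
def Claim_equal_solve : Prop := ∀ (nums : List Int) (target : Int), Dom_solve nums target → Spec_solve nums target (solve nums target)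

-- ===== LEMMAS AND PROOFS =====

-- B's inner loop count: number of prefixes of l whose sum, started from s, equals tgt.
def cntB (s : Int) (l : List Int) (tgt : Int) : Int :=
  match l with
  | [] => 0
  | x :: r => (if s + x = tgt then (1 : Int) else 0) + cntB (s + x) r tgt

-- A's remaining count: L holds the prefix sums seen so far, s the current prefix sum.
def cntA (L : List Int) (s : Int) (l : List Int) (tgt : Int) : Int :=
  match l with
  | [] => 0
  | x :: r => (L.count (s + x - tgt) : Int) + cntA (L ++ [s + x]) (s + x) r tgt

-- B's total: sum of cntB 0 over all suffixes.
def totalB (l : List Int) (tgt : Int) : Int :=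
  match l with
  | [] => 0
  | x :: r => cntB 0 (x :: r) tgt + totalB r tgt

lemma cntA_cons (tgt : Int) :
    ∀ (l : List Int) (p : Int) (L : List Int) (s : Int),
      cntA (p :: L) s l tgt = cntB (s - p) l tgt + cntA L s l tgt := by
  intro l
  induction l with
  | nil => intro p L s; simp [cntA, cntB]
  | cons x r ih =>
    intro p L s
    show (((p :: L).count (s + x - tgt) : Int)) + cntA (p :: (L ++ [s + x])) (s + x) r tgt =
      ((if s - p + x = tgt then (1 : Int) else 0) + cntB (s - p + x) r tgt) +
      ((L.count (s + x - tgt) : Int) + cntA (L ++ [s + x]) (s + x) r tgt)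
    rw [ih]
    have hcnt : ((p :: L).count (s + x - tgt) : Int) =
        (if s - p + x = tgt then (1 : Int) else 0) + (L.count (s + x - tgt) : Int) := by
      simp only [List.count_cons, beq_iff_eq]
      split_ifs <;> push_cast <;> omega
    have hb : s + x - p = s - p + x := by ring
    rw [hb, hcnt]
    ring

lemma cntA_singleton (tgt : Int) :
    ∀ (l : List Int) (q : Int), cntA [q] q l tgt = totalB l tgt := by
  intro l
  induction l with
  | nil => intro q; simp [cntA, totalB]
  | cons x r ih =>
    intro q
    show (([q].count (q + x - tgt) : Int)) + cntA [q, q + x] (q + x) r tgt =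
      ((if (0 : Int) + x = tgt then (1 : Int) else 0) + cntB (0 + x) r tgt) + totalB r tgt
    have h1 : cntA [q, q + x] (q + x) r tgt
        = cntB (q + x - q) r tgt + cntA [q + x] (q + x) r tgt := cntA_cons tgt r q [q + x] (q + x)
    rw [h1, ih]
    have h2 : (([q].count (q + x - tgt) : Int)) = (if (0 : Int) + x = tgt then (1 : Int) else 0) := by
      simp only [List.count_cons, List.count_nil, beq_iff_eq]
      split_ifs <;> push_cast <;> omega
    have h3 : q + x - q = 0 + x := by ring
    rw [h2, h3]
    ring

lemma foldA (tgt : Int) :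
    ∀ (l L : List Int) (s a : Int),
      (List.foldl
        (fun (st : PySem.Dict Int Int × Int × Int) x =>
          let s' := st.2.1 + x
          let comp := s' - tgt
          let ans := if st.1.contains comp then st.2.2 + st.1.getD comp 0 else st.2.2
          (st.1.modify s' 0 (· + 1), s', ans))
        (PySem.Dict.counter L, s, a) l).2.2 = a + cntA L s l tgt := by
  intro l
  induction l with
  | nil => intro L s a; simp [cntA]
  | cons x r ih =>
    intro L s a
    have hseen : (PySem.Dict.counter L).modify (s + x) 0 (· + 1)
        = PySem.Dict.counter (L ++ [s + x]) := (PySem.Dict.counter_append_singleton L (s + x)).symm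
    have hans : (if (PySem.Dict.counter L).contains (s + x - tgt) then
          a + (PySem.Dict.counter L).getD (s + x - tgt) 0 else a)
        = a + (L.count (s + x - tgt) : Int) := by
      rw [PySem.Dict.contains_counter, PySem.Dict.getD_counter]
      by_cases h : (s + x - tgt) ∈ L
      · simp [h]
      · simp [h, List.count_eq_zero_of_not_mem h]
    show (List.foldl _ ((PySem.Dict.counter L).modify (s + x) 0 (· + 1), s + x,
        if (PySem.Dict.counter L).contains (s + x - tgt) then
          a + (PySem.Dict.counter L).getD (s + x - tgt) 0 else a) r).2.2
      = a + ((L.count (s + x - tgt) : Int) + cntA (L ++ [s + x]) (s + x) r tgt)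
    rw [hseen, hans, ih]
    ring

lemma counter_single_zero : PySem.Dict.counter ([0] : List Int) =
    (PySem.Dict.empty : PySem.Dict Int Int).insert 0 1 := by decide

lemma solve_eq_cntA (nums : List Int) (target : Int) :
    solve nums target = cntA [0] 0 nums target := by
  unfold solve
  simp only [PySem.List.len_eq]
  rw [PySem.List.foldl_pyRange_zero_pyGetD' nums 0
    (f := fun (st : PySem.Dict Int Int × Int × Int) x =>
      let s' := st.2.1 + x
      let comp := s' - target
      let ans := if st.1.contains comp then st.2.2 + st.1.getD comp 0 else st.2.2
      (st.1.modify s' 0 (· + 1), s', ans))]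
  rw [← counter_single_zero, foldA target nums [0] 0 0]
  ring

lemma foldB (tgt : Int) :
    ∀ (l : List Int) (s a : Int),
      (List.foldl
        (fun (st : Int × Int) x => (st.1 + x, if st.1 + x = tgt then st.2 + 1 else st.2))
        (s, a) l).2 = a + cntB s l tgt := by
  intro l
  induction l with
  | nil => intro s a; simp [cntB]
  | cons x r ih =>
    intro s a
    show (List.foldl _ (s + x, if s + x = tgt then a + 1 else a) r).2
      = a + ((if s + x = tgt then (1 : Int) else 0) + cntB (s + x) r tgt)
    rw [ih]
    by_cases h : s + x = tgt
    · simp [h]; ring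
    · simp [h]

lemma outerB (tgt : Int) :
    ∀ (nums : List Int) (a : Int),
      List.foldl (fun ans (k : Nat) => ans + cntB 0 (nums.drop k) tgt) a (List.range nums.length)
        = a + totalB nums tgt := by
  intro nums
  induction nums with
  | nil => intro a; simp [totalB]
  | cons x r ih =>
    intro a
    rw [List.length_cons, List.range_succ_eq_map, List.foldl_cons, List.foldl_map]
    show List.foldl (fun ans (k : Nat) => ans + cntB 0 (r.drop k) tgt)
        (a + cntB 0 (x :: r) tgt) (List.range r.length)
      = a + totalB (x :: r) tgt
    rw [ih]
    show a + cntB 0 (x :: r) tgt + totalB r tgt = a + (cntB 0 (x :: r) tgt + totalB r tgt)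
    ring

lemma solve_alt_eq_totalB (nums : List Int) (target : Int) :
    solve_alt nums target = totalB nums target := by
  have hinner : ∀ (acc : Int), ∀ i ∈ PySem.List.pyRange 0 (nums.length : Int) 1,
      (List.foldl
        (fun (st : Int × Int) j =>
          let s := st.1 + PySem.List.pyGetD nums j 0
          (s, if s = target then st.2 + 1 else st.2))
        (0, acc) (PySem.List.pyRange i (nums.length : Int) 1)).2
      = acc + cntB 0 (nums.drop i.toNat) target := by
    intro acc i hi
    have h0 : 0 ≤ i := (PySem.List.mem_pyRange_one.mp hi).1
    rw [PySem.List.foldl_pyRange_pyGetD' nums 0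
      (f := fun (st : Int × Int) x =>
        let s := st.1 + x
        (s, if s = target then st.2 + 1 else st.2))
      ((0 : Int), acc) h0]
    exact foldB target (nums.drop i.toNat) 0 acc
  unfold solve_alt
  simp only [PySem.List.len_eq]
  rw [PySem.List.foldl_congr_mem _ _ (fun ans i => ans + cntB 0 (nums.drop i.toNat) target) _ hinner]
  rw [PySem.List.pyRange_zero_natCast nums.length, List.foldl_map]
  simp only [Int.toNat_natCast]
  rw [outerB target nums 0, zero_add]

-- ===== VERDICT (by name: the statement is the Claim_ definition above) =====
theorem solve_spec : Claim_equal_solve := by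
  intro nums target _
  show solve nums target = solve_alt nums target
  rw [solve_eq_cntA, solve_alt_eq_totalB, cntA_singleton]
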